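-- pv_equiv track=rewrite | github.com/Saichandra12398/CPelective-4 | 05-nthwithproperty309-Python/nthwithproperty309.py | prop309
-- ===== SOURCE A (Python) =====
-- def prop309(n):
-- 	n=n**5
-- 	x=str(n)
-- 	li=[0,0,0,0,0,0,0,0,0,0]
-- 	while n>0:
-- 		li[n%10]+=1
-- 		n//=10
-- 	return li.count(0)==0
-- ===== SOURCE B (Python) =====
-- def prop309(n):
-- 	p = n**5
-- 	return p > 0 and set('0123456789') <= set(str(p))
-- ===== Notes on version B (the rewrite author's own statement) =====
-- stated objective: simpler
-- what changed: Replaces the modulo/floor-divide digit-extraction loop with its ten-slot count array by a positivity guard plus a single set-subset test on the decimal string of the fifth power.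
import Mathlib
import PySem

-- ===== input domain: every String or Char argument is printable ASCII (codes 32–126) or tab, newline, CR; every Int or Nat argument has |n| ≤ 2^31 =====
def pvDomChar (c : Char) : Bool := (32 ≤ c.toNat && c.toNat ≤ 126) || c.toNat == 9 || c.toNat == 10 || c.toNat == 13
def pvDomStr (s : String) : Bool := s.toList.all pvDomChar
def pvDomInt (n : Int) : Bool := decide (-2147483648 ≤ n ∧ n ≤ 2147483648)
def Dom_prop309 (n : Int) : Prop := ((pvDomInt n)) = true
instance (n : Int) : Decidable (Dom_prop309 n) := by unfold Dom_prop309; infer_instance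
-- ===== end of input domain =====

-- B replaces A's divmod digit-counting loop by a set-subset test on str(n**5); objective: simpler.

-- ===== PORT A =====
-- the 'while n>0: li[n%10]+=1; n//=10' loop
def prop309Loop (m : Int) (li : List Int) : List Int :=
  if 0 < m then
    prop309Loop (PySem.Int.floordiv m 10)
      (PySem.List.pySetD li (PySem.Int.mod m 10)
        (PySem.List.pyGetD li (PySem.Int.mod m 10) 0 + 1))
  else li
termination_by m.toNat
decreasing_by
  simp only [PySem.Int.floordiv_eq_ediv_of_pos (by norm_num : (0:Int) < 10)]
  omega

def prop309 (n : Int) : Bool :=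
  let m := n ^ 5
  let _x := PySem.Int.toStr m          -- x = str(n) (computed, unused)
  let li := prop309Loop m [0,0,0,0,0,0,0,0,0,0]
  PySem.List.count li 0 == 0

-- ===== PORT B =====
def prop309_alt (n : Int) : Bool :=
  let p := n ^ 5
  decide (0 < p) &&
    PySem.Set.issubset (PySem.Set.ofList "0123456789".toList)
      (PySem.Set.ofList (PySem.Int.toStr p).toList)

-- ===== PRECONDITION & SPEC =====
def Spec_prop309 (n : Int) (out : Bool) : Prop := out = prop309_alt n
instance (n : Int) (out : Bool) : Decidable (Spec_prop309 n out) := by unfold Spec_prop309; infer_instance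

-- ===== CLAIM (what is proved, stated in full; the proofs are below) =====
def Claim_equal_prop309 : Prop := ∀ (n : Int), Dom_prop309 n → Spec_prop309 n (prop309 n)

-- ===== LEMMAS AND PROOFS =====

-- digitChar is injective on the decimal digits
lemma digitChar_inj_lt10 (d k : Nat) (hd : d < 10) (hk : k < 10)
    (h : Nat.digitChar d = Nat.digitChar k) : d = k := by
  interval_cases d <;> interval_cases k <;> simp_all [Nat.digitChar]

-- Nat.toDigitsCore: accumulator append
lemma toDigitsCore_acc (b : Nat) :
    ∀ (f n : Nat) (acc : List Char),
      Nat.toDigitsCore b f n acc = Nat.toDigitsCore b f n [] ++ acc := by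
  intro f
  induction f with
  | zero => intro n acc; rfl
  | succ f ih =>
    intro n acc
    simp only [Nat.toDigitsCore]
    by_cases h : n / b = 0
    · simp [h]
    · simp only [h, if_false]
      rw [ih (n / b) ((n % b).digitChar :: acc), ih (n / b) [(n % b).digitChar]]
      simp

-- Nat.toDigitsCore: fuel irrelevance (enough fuel)
lemma toDigitsCore_fuel (b : Nat) (hb : 2 ≤ b) :
    ∀ (f1 f2 n : Nat) (acc : List Char), n < f1 → n < f2 →
      Nat.toDigitsCore b f1 n acc = Nat.toDigitsCore b f2 n acc := by
  intro f1
  induction f1 with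
  | zero => intro f2 n acc h1 _; omega
  | succ f ih =>
    intro f2 n acc h1 h2
    cases f2 with
    | zero => omega
    | succ g =>
      simp only [Nat.toDigitsCore]
      by_cases h : n / b = 0
      · simp [h]
      · simp only [h, if_false]
        have hn : 0 < n := by
          rcases Nat.eq_zero_or_pos n with h0 | h0
          · exfalso; apply h; simp [h0]
          · exact h0
        have hlt : n / b < n := Nat.div_lt_self hn (by omega)
        exact ih g (n / b) _ (by omega) (by omega)

-- str(m) for m > 0 is the reversed little-endian decimal digit list, mapped through digitChar
lemma toDigits_eq_digits (m : Nat) (hm : 0 < m) :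
    Nat.toDigits 10 m = ((Nat.digits 10 m).map Nat.digitChar).reverse := by
  induction m using Nat.strong_induction_on with
  | h m ih =>
    simp only [Nat.toDigits, Nat.toDigitsCore]
    by_cases h : m / 10 = 0
    · simp only [h, if_true]
      rw [Nat.digits_def' (by norm_num) hm, h]
      simp
    · simp only [h, if_false]
      have hn : 0 < m / 10 := Nat.pos_of_ne_zero h
      have hlt : m / 10 < m := Nat.div_lt_self hm (by norm_num)
      rw [toDigitsCore_acc 10 m (m / 10) [(m % 10).digitChar]]
      rw [toDigitsCore_fuel 10 (by norm_num) m (m / 10 + 1) (m / 10) [] hlt (by omega)]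
      have : Nat.toDigitsCore 10 (m / 10 + 1) (m / 10) [] = Nat.toDigits 10 (m / 10) := rfl
      rw [this, ih (m / 10) hlt hn]
      rw [Nat.digits_def' (by norm_num : 1 < 10) hm]
      simp

-- the loop preserves the length of the count list
lemma prop309Loop_length (m : Int) (li : List Int) :
    (prop309Loop m li).length = li.length := by
  induction hk : m.toNat using Nat.strong_induction_on generalizing m li with
  | h k ih =>
    rw [prop309Loop]
    by_cases hm : 0 < m
    · simp only [hm, if_true]
      have hdiv : PySem.Int.floordiv m 10 = m / 10 :=
        PySem.Int.floordiv_eq_ediv_of_pos (by norm_num)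
      rw [hdiv, ih (m / 10).toNat (by omega) (m / 10) _ rfl]
      simp [PySem.List.length_pySetD]
    · simp [hm]

-- the loop adds, at slot d, the number of occurrences of d among the decimal digits
lemma prop309Loop_getD (m : Int) (li : List Int) (d : Nat)
    (hd : d < 10) (hlen : li.length = 10) :
    (prop309Loop m li).getD d 0
      = li.getD d 0 + ((Nat.digits 10 m.toNat).count d : Int) := by
  induction hk : m.toNat using Nat.strong_induction_on generalizing m li with
  | h k ih =>
    rw [prop309Loop]
    by_cases hm : 0 < m
    · simp only [hm, if_true]
      have h10 : (0:Int) < 10 := by norm_num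
      have hdiv : PySem.Int.floordiv m 10 = m / 10 :=
        PySem.Int.floordiv_eq_ediv_of_pos h10
      have hmod : PySem.Int.mod m 10 = m % 10 := PySem.Int.mod_eq_emod_of_pos h10
      have hr0 : 0 ≤ m % 10 := Int.emod_nonneg m (by norm_num)
      have hr10 : m % 10 < 10 := Int.emod_lt_of_pos m h10
      have hrt : (m % 10).toNat = m.toNat % 10 := by omega
      have hqt : (m / 10).toNat = m.toNat / 10 := by omega
      set li' := PySem.List.pySetD li (PySem.Int.mod m 10)
        (PySem.List.pyGetD li (PySem.Int.mod m 10) 0 + 1) with hli'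
      have hlen' : li'.length = 10 := by
        rw [hli']; simp [PySem.List.length_pySetD, hlen]
      have hrec := ih (m / 10).toNat (by omega) (m / 10) li' hlen' rfl
      rw [hdiv, hrec]
      -- value of li' at slot d
      have hget : PySem.List.pyGetD li (m % 10) 0 = li.getD (m % 10).toNat 0 := by
        rw [PySem.List.pyGetD_eq_getElem li 0 hr0 (by omega)]
        rw [List.getD_eq_getElem li 0 (by omega)]
      have hset : li' = li.set (m % 10).toNat (li.getD (m % 10).toNat 0 + 1) := by
        rw [hli', hmod, hget, PySem.List.pySetD_of_nonneg li _ hr0]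
      have hslot : li'.getD d 0
          = li.getD d 0 + (if (m % 10).toNat = d then 1 else 0) := by
        by_cases hde : (m % 10).toNat = d
        · subst hde
          rw [if_pos rfl, hset]
          rw [List.getD_eq_getElem (li.set (m % 10).toNat (li.getD (m % 10).toNat 0 + 1)) 0
            (by rw [List.length_set, hlen]; omega)]
          rw [List.getElem_set_self (by rw [List.length_set, hlen]; omega)]
        · rw [if_neg hde, hset]
          rw [List.getD_eq_getElem (li.set (m % 10).toNat (li.getD (m % 10).toNat 0 + 1)) 0
            (by rw [List.length_set, hlen]; omega)]
          rw [List.getElem_set_ne (by omega)]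
          rw [show li.getD d 0 = li[d]'(by omega) from List.getD_eq_getElem li 0 (by omega)]
          ring
      rw [hrt] at hslot
      rw [hslot]
      -- decimal digits of m.toNat, one step
      have hpos : 0 < m.toNat := by omega
      rw [← hk]
      rw [Nat.digits_def' (by norm_num : (1:Nat) < 10) hpos, List.count_cons, hqt]
      by_cases he : m.toNat % 10 = d
      · simp [he]; ring
      · simp [he]
    · simp only [hm, if_false]
      have hz : Nat.digits 10 k = [] := by
        rw [← hk, (by omega : m.toNat = 0)]; simp
      simp [hz]

-- membership of a digit char in the mapped digit list
lemma mem_map_digitChar (k : Nat) (hk : k < 10) (l : List Nat) (hl : ∀ x ∈ l, x < 10) :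
    (Nat.digitChar k ∈ l.map Nat.digitChar) ↔ k ∈ l := by
  constructor
  · intro h
    rcases List.mem_map.1 h with ⟨e, he, heq⟩
    have := digitChar_inj_lt10 e k (hl e he) hk heq
    rwa [← this]
  · intro h; exact List.mem_map_of_mem h

-- the ten digit characters, as mapped digitChars
lemma digit_chars_eq : "0123456789".toList = (List.range 10).map Nat.digitChar := by decide

theorem prop309_eq_alt (n : Int) : prop309 n = prop309_alt n := by
  unfold prop309 prop309_alt
  by_cases hp : 0 < n ^ 5
  · simp only [hp, decide_true, Bool.true_and]
    set p := n ^ 5 with hpdef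
    have hpn : 0 < p.toNat := by omega
    -- A's final list: slot d holds the multiplicity of digit d
    have hlen : (prop309Loop p [0,0,0,0,0,0,0,0,0,0]).length = 10 := by
      rw [prop309Loop_length]; rfl
    have hslot : ∀ d : Nat, d < 10 →
        (prop309Loop p [0,0,0,0,0,0,0,0,0,0]).getD d 0
          = ((Nat.digits 10 p.toNat).count d : Int) := by
      intro d hd
      rw [prop309Loop_getD p _ d hd (by rfl)]
      have : ([0,0,0,0,0,0,0,0,0,0] : List Int).getD d 0 = 0 := by
        interval_cases d <;> rfl
      rw [this]; ring
    set li := prop309Loop p [0,0,0,0,0,0,0,0,0,0] with hli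
    -- B's string side
    have htc : (PySem.Int.toStr p).toList
        = ((Nat.digits 10 p.toNat).map Nat.digitChar).reverse := by
      rw [PySem.Int.toList_toStr]
      have : ¬ p < 0 := by omega
      simp only [PySem.Int.toChars, this, if_false]
      exact toDigits_eq_digits p.toNat (by omega)
    rw [Bool.eq_iff_iff]
    simp only [beq_iff_eq, PySem.List.count_eq, PySem.Set.issubset, List.all_eq_true]
    rw [List.count_eq_zero]
    constructor
    · -- no zero count → every digit char present
      intro h c hc
      rw [PySem.Set.mem_ofList, digit_chars_eq, List.mem_map] at hc
      rcases hc with ⟨k, hk, hck⟩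
      rw [List.mem_range] at hk
      have hmem : k ∈ Nat.digits 10 p.toNat := by
        by_contra hnm
        have hcnt : (Nat.digits 10 p.toNat).count k = 0 := List.count_eq_zero.2 hnm
        apply h
        have : li.getD k 0 = 0 := by rw [hslot k hk, hcnt]; rfl
        rw [← this, List.getD_eq_getElem li 0 (by omega)]
        exact List.getElem_mem _
      have : c ∈ (PySem.Int.toStr p).toList := by
        rw [htc, List.mem_reverse, ← hck]
        exact List.mem_map_of_mem hmem
      have h2 : c ∈ PySem.Int.toChars p := by
        rw [← PySem.Int.toList_toStr]; exact this
      simp [PySem.Set.contains, PySem.Set.mem_ofList, h2]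
    · -- every digit char present → no zero count
      intro h h0
      rcases List.mem_iff_getElem.1 h0 with ⟨d, hdlt, hdeq⟩
      have hd10 : d < 10 := by omega
      have hgd : li.getD d 0 = 0 := by
        rw [List.getD_eq_getElem li 0 (by omega), hdeq]
      rw [hslot d hd10] at hgd
      have hcnt : (Nat.digits 10 p.toNat).count d = 0 := by exact_mod_cast hgd
      have hnm : d ∉ Nat.digits 10 p.toNat := List.count_eq_zero.1 hcnt
      -- but B says digitChar d is present
      have hc := h (Nat.digitChar d) (by
        rw [PySem.Set.mem_ofList, digit_chars_eq]
        exact List.mem_map_of_mem (List.mem_range.2 hd10))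
      have hmem : Nat.digitChar d ∈ (PySem.Int.toStr p).toList := by
        rw [PySem.Int.toList_toStr]
        simpa [PySem.Set.contains, PySem.Set.mem_ofList] using hc
      rw [htc, List.mem_reverse] at hmem
      exact hnm ((mem_map_digitChar d hd10 _
        (fun x hx => Nat.digits_lt_base (by norm_num) hx)).1 hmem)
  · -- p ≤ 0: loop never runs, A counts ten zeros; B's guard is false
    simp only [hp, decide_false, Bool.false_and]
    rw [prop309Loop]
    simp only [hp, if_false]
    decide

-- ===== VERDICT (by name: the statement is the Claim_ definition above) =====
theorem prop309_spec : Claim_equal_prop309 := by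
  intro n _
  unfold Spec_prop309
  exact prop309_eq_alt n
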